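-- pv_equiv track=rewrite | github.com/gamalahmed3265/Codeforces-Problem-Solving | sheet 8 Z. Decoding/main.py | decode_polycarp_encoding
-- ===== SOURCE A (Python) =====
-- def decode_polycarp_encoding(size, word):
--     result = ""
--     i = 0
--     while size > 0:
--         if size % 2 == 0:
--             result = word[i] + result
--         else:
--             result = result + word[i]
--         i += 1
--         size -= 1
--     return result
-- ===== SOURCE B (Python) =====
-- def decode_polycarp_encoding(size, word):
--     if size <= 0:
--         return ""
--     return word[size % 2 : size : 2][::-1] + word[(size + 1) % 2 : size : 2]
-- ===== Notes on version B (the rewrite author's own statement) =====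
-- stated objective: faster
-- what changed: Replaces A's per-character parity loop (prepending/appending to a growing string, quadratic in string copies) by a loop-free closed form: the answer is the extended slice word[size%2:size:2] reversed, concatenated with word[(size+1)%2:size:2].
import Mathlib
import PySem

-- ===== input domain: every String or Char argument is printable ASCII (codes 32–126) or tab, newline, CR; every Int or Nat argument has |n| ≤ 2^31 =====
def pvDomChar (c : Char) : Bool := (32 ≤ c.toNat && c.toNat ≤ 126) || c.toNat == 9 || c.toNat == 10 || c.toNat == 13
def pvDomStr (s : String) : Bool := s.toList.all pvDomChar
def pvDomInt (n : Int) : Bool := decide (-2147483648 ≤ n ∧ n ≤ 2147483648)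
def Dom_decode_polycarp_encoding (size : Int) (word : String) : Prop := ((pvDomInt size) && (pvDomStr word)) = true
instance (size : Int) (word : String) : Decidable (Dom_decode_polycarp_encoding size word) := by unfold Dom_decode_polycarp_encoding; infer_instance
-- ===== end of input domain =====

-- B replaces A's per-character parity loop by a loop-free closed form: two strided slices
-- word[size%2:size:2] (reversed) and word[(size+1)%2:size:2] (objective: faster, measured; A rebuilds the string per character).

-- ===== PORT A =====
-- A's while loop: result is prepended to or appended to according to the parity of the
-- remaining size; `word[i]` is PySem.List.pyGet? (none = IndexError, excluded by Pre_).
-- structural fuel = size.toNat = the exact number of iterations of A's while loop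
def pvGoA (word : List Char) : Nat → Int → Nat → List Char → List Char
  | 0, _, _, result => result
  | fuel + 1, size, i, result =>
      if size > 0 then
        match PySem.List.pyGet? word (i : Int) with
        | some c =>
            pvGoA word fuel (size - 1) (i + 1)
              (if PySem.Int.mod size 2 = 0 then c :: result else result ++ [c])
        | none => result
      else result

def decode_polycarp_encoding (size : Int) (word : String) : String :=
  String.ofList (pvGoA word.toList size.toNat size 0 [])

-- ===== PORT B =====
-- B: early return "" for size <= 0, else the two extended slices, the first reversed by
-- [::-1] = slice? with step -1.  slice? with nonzero step is always `some`; .getD [] totalizes.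
def decode_polycarp_encoding_alt (size : Int) (word : String) : String :=
  if size ≤ 0 then "" else
    let front := (PySem.List.slice? word.toList (some (PySem.Int.mod size 2)) (some size) 2).getD []
    let back  := (PySem.List.slice? word.toList (some (PySem.Int.mod (size + 1) 2)) (some size) 2).getD []
    String.ofList (((PySem.List.slice? front none none (-1)).getD []) ++ back)

-- ===== PRECONDITION & SPEC =====
-- Pre_ excludes exactly the inputs where A raises IndexError: size > len(word).
def Pre_decode_polycarp_encoding (size : Int) (word : String) : Prop :=
  size ≤ (word.toList.length : Int)
instance (size : Int) (word : String) : Decidable (Pre_decode_polycarp_encoding size word) := by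
  unfold Pre_decode_polycarp_encoding; infer_instance

def pvWitness_decode_polycarp_encoding : Int × String := (4, "code")

def Spec_decode_polycarp_encoding (size : Int) (word : String) (out : String) : Prop :=
  out = decode_polycarp_encoding_alt size word
instance (size : Int) (word : String) (out : String) :
    Decidable (Spec_decode_polycarp_encoding size word out) := by
  unfold Spec_decode_polycarp_encoding; infer_instance

-- ===== CLAIM (what is proved, stated in full; the proofs are below) =====
def Claim_equal_decode_polycarp_encoding : Prop :=
  ∀ (size : Int) (word : String), Dom_decode_polycarp_encoding size word →
    Pre_decode_polycarp_encoding size word →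
    Spec_decode_polycarp_encoding size word (decode_polycarp_encoding size word)

-- ===== LEMMAS AND PROOFS =====

-- the characters A prepends (resp. appends), in scan order, starting at index i with
-- remaining size s; fuel n = s.toNat
def pvPre (word : List Char) : Nat → Nat → Int → List Char
  | 0, _, _ => []
  | n + 1, i, s =>
      (if PySem.Int.mod s 2 = 0 then [word.getD i ' '] else []) ++ pvPre word n (i + 1) (s - 1)

def pvApp (word : List Char) : Nat → Nat → Int → List Char
  | 0, _, _ => []
  | n + 1, i, s =>
      (if PySem.Int.mod s 2 = 0 then [] else [word.getD i ' ']) ++ pvApp word n (i + 1) (s - 1)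

theorem pvGoA_eq (word : List Char) :
    ∀ (n : Nat) (s : Int) (i : Nat) (result : List Char),
      s.toNat = n → (i : Int) + s ≤ word.length →
      pvGoA word n s i result =
        (pvPre word n i s).reverse ++ result ++ pvApp word n i s := by
  intro n
  induction n with
  | zero =>
      intro s i result _ _
      simp [pvGoA, pvPre, pvApp]
  | succ n ih =>
      intro s i result hn hle
      have hs : s > 0 := by omega
      have hi : i < word.length := by omega
      have hget : PySem.List.pyGet? word (i : Int) = some word[i] := by
        simp [PySem.List.pyGet?_natCast, List.getElem?_eq_getElem hi]
      have hsome : word[i]? = some word[i] := List.getElem?_eq_getElem hi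
      have harg : ((i + 1 : Nat) : Int) + (s - 1) ≤ word.length := by push_cast; omega
      unfold pvGoA
      rw [if_pos hs, hget]
      show pvGoA word n (s - 1) (i + 1)
          (if PySem.Int.mod s 2 = 0 then word[i] :: result else result ++ [word[i]]) = _
      by_cases hpar : (2 : Int) ∣ s
      · rw [if_pos ((PySem.Int.mod_eq_zero_iff_dvd s 2).mpr hpar), ih (s - 1) (i + 1) (word[i] :: result) (by omega) harg]
        simp [pvPre, pvApp, hpar, hsome]
      · rw [if_neg (fun hm => hpar ((PySem.Int.mod_eq_zero_iff_dvd s 2).mp hm)), ih (s - 1) (i + 1) (result ++ [word[i]]) (by omega) harg]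
        simp [pvPre, pvApp, hpar, hsome]

-- closed forms for the two character groups: maps over ranges with stride 2
theorem pvPre_eq (word : List Char) :
    ∀ (n : Nat) (i : Nat) (s : Int), 0 ≤ s → s.toNat = n →
      pvPre word n i s =
        (List.range (n / 2)).map (fun k => word.getD (i + n % 2 + 2 * k) ' ') := by
  intro n
  induction n with
  | zero => intro i s _ _; simp [pvPre]
  | succ n ih =>
      intro i s hs hn
      have hs' : (0 : Int) ≤ s - 1 := by omega
      have hn' : (s - 1).toNat = n := by omega
      have hpar : PySem.Int.mod s 2 = 0 ↔ (2 : Int) ∣ s := PySem.Int.mod_eq_zero_iff_dvd s 2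
      unfold pvPre
      rw [ih (i + 1) (s - 1) hs' hn']
      by_cases h2 : (n + 1) % 2 = 0
      · have hdvd : (2 : Int) ∣ s := by
          have : s = ((n + 1 : Nat) : Int) := by omega
          omega
        rw [if_pos (hpar.mpr hdvd)]
        have hne : n % 2 = 1 := by omega
        have hrange : (n + 1) / 2 = n / 2 + 1 := by omega
        rw [h2, hrange, List.range_succ_eq_map]
        simp [List.map_map, List.map_inj_left]
        intro a ha
        rw [show i + 1 + n % 2 + 2 * a = i + 2 * (a + 1) from by omega]
      · have hndvd : ¬ (2 : Int) ∣ s := by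
          have : s = ((n + 1 : Nat) : Int) := by omega
          omega
        rw [if_neg (fun hm => hndvd (hpar.mp hm))]
        have hrange : (n + 1) / 2 = n / 2 := by omega
        have hne : (n + 1) % 2 = 1 := by omega
        have hn2 : n % 2 = 0 := by omega
        rw [hrange, hne]
        simp only [List.nil_append]
        apply List.map_congr_left
        intro k _
        congr 1
        omega

theorem pvApp_eq (word : List Char) :
    ∀ (n : Nat) (i : Nat) (s : Int), 0 ≤ s → s.toNat = n →
      pvApp word n i s =
        (List.range ((n + 1) / 2)).map (fun k => word.getD (i + (n + 1) % 2 + 2 * k) ' ') := by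
  intro n
  induction n with
  | zero => intro i s _ _; simp [pvApp]
  | succ n ih =>
      intro i s hs hn
      have hs' : (0 : Int) ≤ s - 1 := by omega
      have hn' : (s - 1).toNat = n := by omega
      have hpar : PySem.Int.mod s 2 = 0 ↔ (2 : Int) ∣ s := PySem.Int.mod_eq_zero_iff_dvd s 2
      unfold pvApp
      rw [ih (i + 1) (s - 1) hs' hn']
      by_cases h2 : (n + 1) % 2 = 0
      · have hdvd : (2 : Int) ∣ s := by
          have : s = ((n + 1 : Nat) : Int) := by omega
          omega
        rw [if_pos (hpar.mpr hdvd)]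
        have hrange : (n + 1 + 1) / 2 = (n + 1) / 2 := by omega
        have he1 : (n + 1 + 1) % 2 = 1 := by omega
        have he2 : (n + 1) % 2 = 0 := by omega
        rw [hrange, he1]
        simp only [List.nil_append]
        apply List.map_congr_left
        intro k _
        congr 1
        omega
      · have hndvd : ¬ (2 : Int) ∣ s := by
          have : s = ((n + 1 : Nat) : Int) := by omega
          omega
        rw [if_neg (fun hm => hndvd (hpar.mp hm))]
        have hrange : (n + 1 + 1) / 2 = (n + 1) / 2 + 1 := by omega
        have he1 : (n + 1 + 1) % 2 = 0 := by omega
        have he2 : (n + 1) % 2 = 1 := by omega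
        rw [hrange, he1, List.range_succ_eq_map]
        simp [List.map_map, List.map_inj_left]
        intro a ha
        rw [show i + 1 + (n + 1) % 2 + 2 * a = i + 2 * (a + 1) from by omega]

-- slice with stride 2 and in-range nonneg bounds, as a map over a range
theorem pvSlice2_eq (xs : List Char) (a b : Int) (ha : 0 ≤ a) (hab : a ≤ b)
    (hb : b ≤ (xs.length : Int)) :
    PySem.List.slice? xs (some a) (some b) 2 =
      some ((List.range ((b - a + 1) / 2).toNat).map (fun k => xs.getD (a.toNat + 2 * k) ' ')) := by
  simp only [PySem.List.slice?, PySem.List.sliceIndices]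
  norm_num
  have hstart : (if a < 0 then max (a + (xs.length : Int)) 0 else min a (xs.length : Int)) = a := by
    rw [if_neg (by omega)]; omega
  have hstop : (if b < 0 then max (b + (xs.length : Int)) 0 else min b (xs.length : Int)) = b := by
    rw [if_neg (by omega)]; omega
  rw [hstart, hstop]
  have hcount : (if a < b then ((b - a + 2 - 1) / 2).toNat else 0) = ((b - a + 1) / 2).toNat := by
    by_cases h : a < b
    · rw [if_pos h]; omega
    · rw [if_neg h]
      have : b = a := by omega
      simp [this]
  rw [hcount]
  rw [← List.filterMap_eq_map]
  apply List.filterMap_congr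
  intro k hk
  have hk' : k < ((b - a + 1) / 2).toNat := List.mem_range.mp hk
  have hidx : (a + 2 * (k : Int)).toNat = a.toNat + 2 * k := by omega
  have hlt : a.toNat + 2 * k < xs.length := by omega
  simp only [Function.comp_apply, hidx, List.getElem?_eq_getElem hlt]
  simp

-- ===== VERDICT (by name: the statement is the Claim_ definition above) =====
theorem decode_polycarp_encoding_spec : Claim_equal_decode_polycarp_encoding := by
  intro size word _hdom hpre
  unfold Spec_decode_polycarp_encoding
  unfold decode_polycarp_encoding decode_polycarp_encoding_alt
  have hpre' : size ≤ (word.toList.length : Int) := hpre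
  by_cases hz : size ≤ 0
  · rw [if_pos hz]
    have : size.toNat = 0 := by omega
    rw [this]
    simp [pvGoA]
  · rw [if_neg hz]
    have hsz : 0 < size := by omega
    set n : Nat := size.toNat with hn
    have hsn : size = (n : Int) := by omega
    -- A side
    rw [pvGoA_eq word.toList n size 0 [] rfl (by simpa using hpre'),
        pvPre_eq word.toList n 0 size (by omega) rfl,
        pvApp_eq word.toList n 0 size (by omega) rfl]
    -- B side
    have hmodf : PySem.Int.mod size 2 = ((n % 2 : Nat) : Int) := by
      rw [PySem.Int.mod_eq_emod_of_pos (by norm_num), hsn]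
      omega
    have hmodb : PySem.Int.mod (size + 1) 2 = (((n + 1) % 2 : Nat) : Int) := by
      rw [PySem.Int.mod_eq_emod_of_pos (by norm_num), hsn]
      omega
    rw [hmodf, hmodb,
        pvSlice2_eq word.toList ((n % 2 : Nat) : Int) size (by positivity) (by omega) hpre',
        pvSlice2_eq word.toList (((n + 1) % 2 : Nat) : Int) size (by positivity) (by omega) hpre']
    have hcf : ((size - ((n % 2 : Nat) : Int) + 1) / 2).toNat = n / 2 := by omega
    have hcb : ((size - (((n + 1) % 2 : Nat) : Int) + 1) / 2).toNat = (n + 1) / 2 := by omega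
    rw [hcf, hcb]
    simp only [Option.getD_some, PySem.List.slice?_none_none_neg_one, Int.toNat_natCast]
    simp
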